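-- pv_equiv track=rewrite | github.com/smileydeeps27-star/account-plan-generator | output/update-trackers.py | tracker_name_for
-- ===== SOURCE A (Python) =====
-- NAME_MAP = {
--     "HP Inc.": "HP",
--     "Kimberly-Clark": "Kimberly-Clark Corp. (KCC)",
--     "Mary Kay Inc.": "MaryKay",
--     "McLane Company": "McLane",
--     "Hewlett Packard Enterprise": "HPE",
--     "Carlsberg Group": "Carlsberg / Britvic",
-- }
--
-- def norm(s):
--     if s is None:
--         return ""
--     return str(s).strip().lower().replace("  ", " ")
--
-- def tracker_name_for(gen_name, tracker_names):
--     """Resolve a generated docx stem to a tracker Account string.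
--
--     1. Explicit NAME_MAP hit.
--     2. Normalized exact match.
--     3. Normalized startswith / substring match (handles trailing " Corp.", etc.).
--     """
--     if gen_name in NAME_MAP:
--         return NAME_MAP[gen_name]
--     g = norm(gen_name)
--     for t in tracker_names:
--         if norm(t) == g:
--             return t
--     for t in tracker_names:
--         tn = norm(t)
--         if tn.startswith(g) or g.startswith(tn) or g in tn or tn in g:
--             return t
--     return None
-- ===== SOURCE B (Python) =====
-- NAME_MAP = {
--     "HP Inc.": "HP",
--     "Kimberly-Clark": "Kimberly-Clark Corp. (KCC)",
--     "Mary Kay Inc.": "MaryKay",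
--     "McLane Company": "McLane",
--     "Hewlett Packard Enterprise": "HPE",
--     "Carlsberg Group": "Carlsberg / Britvic",
-- }
--
-- def norm(s):
--     if s is None:
--         return ""
--     return str(s).strip().lower().replace("  ", " ")
--
-- def tracker_name_for(gen_name, tracker_names):
--     """Resolve a generated docx stem to a tracker Account string (single pass)."""
--     if gen_name in NAME_MAP:
--         return NAME_MAP[gen_name]
--     g = norm(gen_name)
--     fallback = None
--     for t in tracker_names:
--         tn = norm(t)
--         if tn == g:
--             return t
--         if fallback is None and (tn.startswith(g) or g.startswith(tn) or g in tn or tn in g):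
--             fallback = t
--     return fallback
-- ===== Notes on version B (the rewrite author's own statement) =====
-- stated objective: alternative
-- what changed: A's two separate scans (exact-match pass, then substring pass) are collapsed into one pass that returns an exact match immediately and remembers the first substring match as a fallback, normalizing each tracker name once instead of up to twice.
import Mathlib
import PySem

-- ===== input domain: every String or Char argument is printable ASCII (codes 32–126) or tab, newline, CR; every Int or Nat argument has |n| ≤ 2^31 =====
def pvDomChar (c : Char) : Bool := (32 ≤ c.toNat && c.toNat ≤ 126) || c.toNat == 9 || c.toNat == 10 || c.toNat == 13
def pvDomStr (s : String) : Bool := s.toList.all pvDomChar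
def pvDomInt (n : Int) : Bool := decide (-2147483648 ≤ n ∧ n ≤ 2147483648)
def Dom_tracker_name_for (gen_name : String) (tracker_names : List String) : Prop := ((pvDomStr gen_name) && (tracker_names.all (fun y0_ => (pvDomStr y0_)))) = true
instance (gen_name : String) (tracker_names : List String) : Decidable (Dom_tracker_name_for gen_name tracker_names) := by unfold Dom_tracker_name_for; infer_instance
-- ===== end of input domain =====

-- B collapses A's two scans (exact, then substring) into one scan with a remembered
-- first-substring fallback; same return value everywhere ("alternative", no speed claim).

-- ===== PORT A =====
def pvNameMap : PySem.Dict String String := PySem.Dict.ofList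
  [("HP Inc.", "HP"),
   ("Kimberly-Clark", "Kimberly-Clark Corp. (KCC)"),
   ("Mary Kay Inc.", "MaryKay"),
   ("McLane Company", "McLane"),
   ("Hewlett Packard Enterprise", "HPE"),
   ("Carlsberg Group", "Carlsberg / Britvic")]

-- norm(s) for a str argument: str(s).strip().lower().replace("  ", " ")
def pvNorm (s : String) : String :=
  PySem.Str.replace (PySem.Str.lower (PySem.Str.strip s)) "  " " "

-- first loop of A: normalized exact match
def pvFindExact (g : String) : List String → Option String
  | [] => none
  | t :: ts => if pvNorm t == g then some t else pvFindExact g ts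

-- the substring condition of A's second loop
def pvSubCond (g t : String) : Bool :=
  let tn := pvNorm t
  PySem.Str.startswith tn g || PySem.Str.startswith g tn ||
    PySem.Str.isIn g tn || PySem.Str.isIn tn g

-- second loop of A: normalized startswith / substring match
def pvFindSub (g : String) : List String → Option String
  | [] => none
  | t :: ts => if pvSubCond g t then some t else pvFindSub g ts

def tracker_name_for (gen_name : String) (tracker_names : List String) : Option String :=
  if pvNameMap.contains gen_name then pvNameMap.get? gen_name
  else
    let g := pvNorm gen_name
    match pvFindExact g tracker_names with
    | some t => some t
    | none => pvFindSub g tracker_names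

-- ===== PORT B =====
-- single pass: return an exact match at once, remember the first substring match
def pvLoop (g : String) : List String → Option String → Option String
  | [], fb => fb
  | t :: ts, fb =>
    let tn := pvNorm t
    if tn == g then some t
    else pvLoop g ts (if fb.isNone &&
        (PySem.Str.startswith tn g || PySem.Str.startswith g tn ||
         PySem.Str.isIn g tn || PySem.Str.isIn tn g) then some t else fb)

def tracker_name_for_alt (gen_name : String) (tracker_names : List String) : Option String :=
  if pvNameMap.contains gen_name then pvNameMap.get? gen_name
  else pvLoop (pvNorm gen_name) tracker_names none

-- ===== PRECONDITION & SPEC =====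
def Spec_tracker_name_for (gen_name : String) (tracker_names : List String) (out : Option String) : Prop := out = tracker_name_for_alt gen_name tracker_names
instance (gen_name : String) (tracker_names : List String) (out : Option String) : Decidable (Spec_tracker_name_for gen_name tracker_names out) := by unfold Spec_tracker_name_for; infer_instance

-- ===== CLAIM (what is proved, stated in full; the proofs are below) =====
def Claim_equal_tracker_name_for : Prop := ∀ (gen_name : String) (tracker_names : List String), Dom_tracker_name_for gen_name tracker_names → Spec_tracker_name_for gen_name tracker_names (tracker_name_for gen_name tracker_names)

-- ===== LEMMAS AND PROOFS =====
lemma pvLoop_eq (g : String) (ts : List String) (fb : Option String) :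
    pvLoop g ts fb =
      match pvFindExact g ts with
      | some t => some t
      | none => match fb with
                | some x => some x
                | none => pvFindSub g ts := by
  induction ts generalizing fb with
  | nil => cases fb <;> simp [pvLoop, pvFindExact, pvFindSub]
  | cons t ts ih =>
    by_cases h : pvNorm t == g
    · simp [pvLoop, pvFindExact, h]
    · cases fb with
      | some x =>
        simp [pvLoop, pvFindExact, pvFindSub, h, ih]
      | none =>
        simp [pvLoop, pvFindExact, pvFindSub, pvSubCond, h, ih]
        cases pvFindExact g ts
        · split_ifs <;> rfl
        · rfl

-- ===== VERDICT (by name: the statement is the Claim_ definition above) =====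
theorem tracker_name_for_spec : Claim_equal_tracker_name_for := by
  intro gen_name tracker_names _
  unfold Spec_tracker_name_for tracker_name_for tracker_name_for_alt
  by_cases hm : pvNameMap.contains gen_name
  · simp [hm]
  · simp [hm, pvLoop_eq]
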